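-- pv_equiv track=rewrite | github.com/DSPinheiro/SpectraSimulations | utils/functions.py | updateSatTransitionVals
-- ===== SOURCE A (Python) =====
-- def updateSatTransitionVals(low_level, high_level, key, sat_stick_val, beam, FWHM, free = False):
--     """
--     Function to update the satellite rates for the selected transition and shake level
--
--         Args:
--             low_level: low level of the selected transition
--             high_level: high level of the selected transition
--             key: shake level of the satellite transition
--             sat_stick_val: list with all the possible satellite transitions for the current diagram transition
--             beam: beam energy user value from the interface
--
--         Returns:
--             sat_stick_val_ind: list with the satellite rates for the selected diagram transition and shake level
--     """
--     if not free:
--         # Filter the satellite rates data for the combinations of selected levels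
--         sat_stick_val_ind1 = [line for line in sat_stick_val if low_level + key in line[1] and key + high_level in line[5]]
--         sat_stick_val_ind2 = [line for line in sat_stick_val if low_level + key in line[1] and high_level + key in line[5]]
--         sat_stick_val_ind3 = [line for line in sat_stick_val if key + low_level in line[1] and key + high_level in line[5]]
--         sat_stick_val_ind4 = [line for line in sat_stick_val if key + low_level in line[1] and high_level + key in line[5]]
--     else:
--         # Filter the satellite rates data for the combinations of selected levels
--         sat_stick_val_ind1 = [line for line in sat_stick_val if low_level + key in line[1]]
--         sat_stick_val_ind2 = [line for line in sat_stick_val if low_level + key in line[1]]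
--         sat_stick_val_ind3 = [line for line in sat_stick_val if key + low_level in line[1]]
--         sat_stick_val_ind4 = [line for line in sat_stick_val if key + low_level in line[1]]
--
--     sat_stick_val_ind = sat_stick_val_ind1 + sat_stick_val_ind2 + sat_stick_val_ind3 + sat_stick_val_ind4
--
--     return sat_stick_val_ind
-- ===== SOURCE B (Python) =====
-- def updateSatTransitionVals(low_level, high_level, key, sat_stick_val, beam, FWHM, free = False):
--     # Single pass: classify each line once into four buckets, then concatenate.
--     b1, b2, b3, b4 = [], [], [], []
--     for line in sat_stick_val:
--         lk = low_level + key in line[1]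
--         kl = key + low_level in line[1]
--         if not (lk or kl):
--             continue
--         if free:
--             kh = hk = True
--         else:
--             kh = key + high_level in line[5]
--             hk = high_level + key in line[5]
--         if lk and kh: b1.append(line)
--         if lk and hk: b2.append(line)
--         if kl and kh: b3.append(line)
--         if kl and hk: b4.append(line)
--     return b1 + b2 + b3 + b4
-- ===== Notes on version B (the rewrite author's own statement) =====
-- stated objective: alternative
-- what changed: Replaced A's four separate list-comprehension passes over sat_stick_val by a single pass that computes the membership booleans once per line and appends to four buckets, concatenated at the end.
import Mathlib
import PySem

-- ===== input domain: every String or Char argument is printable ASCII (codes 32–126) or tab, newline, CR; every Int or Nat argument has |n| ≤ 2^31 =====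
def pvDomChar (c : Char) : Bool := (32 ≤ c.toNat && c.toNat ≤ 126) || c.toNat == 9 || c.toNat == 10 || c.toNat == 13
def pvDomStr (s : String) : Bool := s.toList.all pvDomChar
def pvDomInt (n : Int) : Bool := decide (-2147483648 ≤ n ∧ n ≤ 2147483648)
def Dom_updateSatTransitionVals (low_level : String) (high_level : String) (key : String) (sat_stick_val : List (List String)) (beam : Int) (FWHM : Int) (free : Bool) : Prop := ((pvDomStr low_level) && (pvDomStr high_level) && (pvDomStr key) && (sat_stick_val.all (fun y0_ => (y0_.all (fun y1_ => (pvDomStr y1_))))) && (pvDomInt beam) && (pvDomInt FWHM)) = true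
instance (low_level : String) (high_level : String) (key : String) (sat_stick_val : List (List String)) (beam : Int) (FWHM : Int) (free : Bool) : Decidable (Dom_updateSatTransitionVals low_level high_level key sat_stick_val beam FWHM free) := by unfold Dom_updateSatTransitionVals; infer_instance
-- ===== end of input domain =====

-- B replaces A's four separate comprehension passes by one pass that classifies each
-- line once into four buckets (objective: alternative single-pass decomposition).
-- line[1] / line[5] are ported as pyGetD with default ""; Pre_ excludes exactly the
-- inputs on which the Python raises IndexError, so the default is never consulted there.

-- ===== PORT A =====
def updateSatTransitionVals (low_level : String) (high_level : String) (key : String) (sat_stick_val : List (List String)) (beam : Int) (FWHM : Int) (free : Bool) : List (List String) :=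
  if !free then
    let ind1 := sat_stick_val.filter (fun line => PySem.Str.isIn (low_level ++ key) (PySem.List.pyGetD line 1 "") && PySem.Str.isIn (key ++ high_level) (PySem.List.pyGetD line 5 ""))
    let ind2 := sat_stick_val.filter (fun line => PySem.Str.isIn (low_level ++ key) (PySem.List.pyGetD line 1 "") && PySem.Str.isIn (high_level ++ key) (PySem.List.pyGetD line 5 ""))
    let ind3 := sat_stick_val.filter (fun line => PySem.Str.isIn (key ++ low_level) (PySem.List.pyGetD line 1 "") && PySem.Str.isIn (key ++ high_level) (PySem.List.pyGetD line 5 ""))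
    let ind4 := sat_stick_val.filter (fun line => PySem.Str.isIn (key ++ low_level) (PySem.List.pyGetD line 1 "") && PySem.Str.isIn (high_level ++ key) (PySem.List.pyGetD line 5 ""))
    ind1 ++ ind2 ++ ind3 ++ ind4
  else
    let ind1 := sat_stick_val.filter (fun line => PySem.Str.isIn (low_level ++ key) (PySem.List.pyGetD line 1 ""))
    let ind2 := sat_stick_val.filter (fun line => PySem.Str.isIn (low_level ++ key) (PySem.List.pyGetD line 1 ""))
    let ind3 := sat_stick_val.filter (fun line => PySem.Str.isIn (key ++ low_level) (PySem.List.pyGetD line 1 ""))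
    let ind4 := sat_stick_val.filter (fun line => PySem.Str.isIn (key ++ low_level) (PySem.List.pyGetD line 1 ""))
    ind1 ++ ind2 ++ ind3 ++ ind4

-- ===== PORT B =====
def updateSatTransitionVals_alt (low_level : String) (high_level : String) (key : String) (sat_stick_val : List (List String)) (beam : Int) (FWHM : Int) (free : Bool) : List (List String) :=
  let r := sat_stick_val.foldl (fun (acc : List (List String) × List (List String) × List (List String) × List (List String)) line =>
    let lk := PySem.Str.isIn (low_level ++ key) (PySem.List.pyGetD line 1 "")
    let kl := PySem.Str.isIn (key ++ low_level) (PySem.List.pyGetD line 1 "")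
    if !(lk || kl) then acc
    else
      let kh := if free then true else PySem.Str.isIn (key ++ high_level) (PySem.List.pyGetD line 5 "")
      let hk := if free then true else PySem.Str.isIn (high_level ++ key) (PySem.List.pyGetD line 5 "")
      (if lk && kh then acc.1 ++ [line] else acc.1,
       if lk && hk then acc.2.1 ++ [line] else acc.2.1,
       if kl && kh then acc.2.2.1 ++ [line] else acc.2.2.1,
       if kl && hk then acc.2.2.2 ++ [line] else acc.2.2.2)) ([], [], [], [])
  r.1 ++ r.2.1 ++ r.2.2.1 ++ r.2.2.2

-- ===== PRECONDITION & SPEC =====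
-- Pre_ excludes exactly the inputs on which Python A raises IndexError: some line is
-- too short for an index access A actually performs (line[1] always; line[5] only when
-- not free and one of the two line[1] membership tests succeeded).
def Pre_updateSatTransitionVals (low_level : String) (high_level : String) (key : String) (sat_stick_val : List (List String)) (beam : Int) (FWHM : Int) (free : Bool) : Prop :=
  if free then
    ∀ line ∈ sat_stick_val, 2 ≤ line.length
  else
    ∀ line ∈ sat_stick_val, 6 ≤ line.length ∨
      (2 ≤ line.length ∧ PySem.Str.isIn (low_level ++ key) (PySem.List.pyGetD line 1 "") = false ∧ PySem.Str.isIn (key ++ low_level) (PySem.List.pyGetD line 1 "") = false)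
instance (low_level : String) (high_level : String) (key : String) (sat_stick_val : List (List String)) (beam : Int) (FWHM : Int) (free : Bool) : Decidable (Pre_updateSatTransitionVals low_level high_level key sat_stick_val beam FWHM free) := by unfold Pre_updateSatTransitionVals; infer_instance

def pvWitness_updateSatTransitionVals : String × String × String × List (List String) × Int × Int × Bool :=
  ("K1", "L3", "s", [["1", "K1s x", "a", "b", "c", "sL3 y"], ["2", "zz", "a", "b", "c", "L3s"]], 10, 2, false)

def Spec_updateSatTransitionVals (low_level : String) (high_level : String) (key : String) (sat_stick_val : List (List String)) (beam : Int) (FWHM : Int) (free : Bool) (out : List (List String)) : Prop := out = updateSatTransitionVals_alt low_level high_level key sat_stick_val beam FWHM free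
instance (low_level : String) (high_level : String) (key : String) (sat_stick_val : List (List String)) (beam : Int) (FWHM : Int) (free : Bool) (out : List (List String)) : Decidable (Spec_updateSatTransitionVals low_level high_level key sat_stick_val beam FWHM free out) := by unfold Spec_updateSatTransitionVals; infer_instance

-- ===== CLAIM (what is proved, stated in full; the proofs are below) =====
def Claim_equal_updateSatTransitionVals : Prop := ∀ (low_level : String) (high_level : String) (key : String) (sat_stick_val : List (List String)) (beam : Int) (FWHM : Int) (free : Bool), Dom_updateSatTransitionVals low_level high_level key sat_stick_val beam FWHM free → Pre_updateSatTransitionVals low_level high_level key sat_stick_val beam FWHM free → Spec_updateSatTransitionVals low_level high_level key sat_stick_val beam FWHM free (updateSatTransitionVals low_level high_level key sat_stick_val beam FWHM free)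

-- ===== LEMMAS AND PROOFS =====

-- A fold that appends to four buckets under four boolean tests computes the four filters.
theorem quad_foldl {α : Type} (c1 c2 c3 c4 : α → Bool)
    (g : (List α × List α × List α × List α) → α → (List α × List α × List α × List α))
    (hg : ∀ acc x, g acc x =
      (if c1 x then acc.1 ++ [x] else acc.1,
       if c2 x then acc.2.1 ++ [x] else acc.2.1,
       if c3 x then acc.2.2.1 ++ [x] else acc.2.2.1,
       if c4 x then acc.2.2.2 ++ [x] else acc.2.2.2)) :
    ∀ (l : List α) (a1 a2 a3 a4 : List α),
      l.foldl g (a1, a2, a3, a4) =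
        (a1 ++ l.filter c1, a2 ++ l.filter c2, a3 ++ l.filter c3, a4 ++ l.filter c4) := by
  intro l
  induction l with
  | nil => intro a1 a2 a3 a4; simp
  | cons x xs ih =>
    intro a1 a2 a3 a4
    rw [List.foldl_cons, hg, ih]
    simp only [List.filter_cons]
    split_ifs <;> simp

theorem updateSatTransitionVals_witness :
    Dom_updateSatTransitionVals (pvWitness_updateSatTransitionVals.1) (pvWitness_updateSatTransitionVals.2.1) (pvWitness_updateSatTransitionVals.2.2.1) (pvWitness_updateSatTransitionVals.2.2.2.1) (pvWitness_updateSatTransitionVals.2.2.2.2.1) (pvWitness_updateSatTransitionVals.2.2.2.2.2.1) (pvWitness_updateSatTransitionVals.2.2.2.2.2.2) ∧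
    Pre_updateSatTransitionVals (pvWitness_updateSatTransitionVals.1) (pvWitness_updateSatTransitionVals.2.1) (pvWitness_updateSatTransitionVals.2.2.1) (pvWitness_updateSatTransitionVals.2.2.2.1) (pvWitness_updateSatTransitionVals.2.2.2.2.1) (pvWitness_updateSatTransitionVals.2.2.2.2.2.1) (pvWitness_updateSatTransitionVals.2.2.2.2.2.2) := by
  decide

-- ===== VERDICT (by name: the statement is the Claim_ definition above) =====
theorem updateSatTransitionVals_spec : Claim_equal_updateSatTransitionVals := by
  intro low_level high_level key sat_stick_val beam FWHM free _ _
  unfold Spec_updateSatTransitionVals updateSatTransitionVals updateSatTransitionVals_alt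
  cases free with
  | false =>
    simp only [Bool.not_false, if_pos]
    rw [quad_foldl
      (fun line => PySem.Str.isIn (low_level ++ key) (PySem.List.pyGetD line 1 "") && PySem.Str.isIn (key ++ high_level) (PySem.List.pyGetD line 5 ""))
      (fun line => PySem.Str.isIn (low_level ++ key) (PySem.List.pyGetD line 1 "") && PySem.Str.isIn (high_level ++ key) (PySem.List.pyGetD line 5 ""))
      (fun line => PySem.Str.isIn (key ++ low_level) (PySem.List.pyGetD line 1 "") && PySem.Str.isIn (key ++ high_level) (PySem.List.pyGetD line 5 ""))
      (fun line => PySem.Str.isIn (key ++ low_level) (PySem.List.pyGetD line 1 "") && PySem.Str.isIn (high_level ++ key) (PySem.List.pyGetD line 5 ""))]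
    · simp
    · intro acc x
      cases h1 : PySem.Str.isIn (low_level ++ key) (PySem.List.pyGetD x 1 "") <;>
      cases h2 : PySem.Str.isIn (key ++ low_level) (PySem.List.pyGetD x 1 "") <;>
      cases h3 : PySem.Str.isIn (key ++ high_level) (PySem.List.pyGetD x 5 "") <;>
      cases h4 : PySem.Str.isIn (high_level ++ key) (PySem.List.pyGetD x 5 "") <;>
        simp only [h1, h2, h3, h4, Bool.false_or, Bool.or_false, Bool.or_self, Bool.true_or,
          Bool.not_false, Bool.not_true, if_true, if_false, Bool.false_and, Bool.true_and,
          Bool.and_false, Bool.and_true, Bool.and_self, if_pos, cond_true, cond_false] <;>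
        simp
  | true =>
    simp only [Bool.not_true, Bool.false_eq_true, if_false, if_neg]
    rw [quad_foldl
      (fun line => PySem.Str.isIn (low_level ++ key) (PySem.List.pyGetD line 1 ""))
      (fun line => PySem.Str.isIn (low_level ++ key) (PySem.List.pyGetD line 1 ""))
      (fun line => PySem.Str.isIn (key ++ low_level) (PySem.List.pyGetD line 1 ""))
      (fun line => PySem.Str.isIn (key ++ low_level) (PySem.List.pyGetD line 1 ""))]
    · simp
    · intro acc x
      cases h1 : PySem.Str.isIn (low_level ++ key) (PySem.List.pyGetD x 1 "") <;>
      cases h2 : PySem.Str.isIn (key ++ low_level) (PySem.List.pyGetD x 1 "") <;>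
      cases h3 : PySem.Str.isIn (key ++ high_level) (PySem.List.pyGetD x 5 "") <;>
      cases h4 : PySem.Str.isIn (high_level ++ key) (PySem.List.pyGetD x 5 "") <;>
        simp only [h1, h2, h3, h4, Bool.false_or, Bool.or_false, Bool.or_self, Bool.true_or,
          Bool.not_false, Bool.not_true, if_true, if_false, Bool.false_and, Bool.true_and,
          Bool.and_false, Bool.and_true, Bool.and_self, if_pos, cond_true, cond_false] <;>
        simp
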